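-- pv_equiv track=rewrite | github.com/ther8t/leetcode | 1048_longest-string-chain.py | isAPredecessorOfB
-- ===== SOURCE A (Python) =====
-- def isAPredecessorOfB(a, b):
--     if a == b:
--         return False
--     # a, b = (a, b) if len(a) <= len(b) else (b, a)
--     index = 0
--     while index < len(a) and index < len(b) and a[index] == b[index]:
--         index += 1
--     while index < len(a) and index + 1 < len(b) and a[index] == b[index + 1]:
--         index += 1
--
--     return True if index == len(a) and index + 1 == len(b) else False
-- ===== SOURCE B (Python) =====
-- def isAPredecessorOfB(a, b):
--     if len(b) != len(a) + 1:
--         return False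
--     for i in range(len(b)):
--         if b[:i] + b[i+1:] == a:
--             return True
--     return False
-- ===== Notes on version B (the rewrite author's own statement) =====
-- stated objective: simpler
-- what changed: Replaces A's two-pointer prefix/suffix index walk with a length guard plus trying every single-character deletion of b; shorter and plainly correct.
import Mathlib
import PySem

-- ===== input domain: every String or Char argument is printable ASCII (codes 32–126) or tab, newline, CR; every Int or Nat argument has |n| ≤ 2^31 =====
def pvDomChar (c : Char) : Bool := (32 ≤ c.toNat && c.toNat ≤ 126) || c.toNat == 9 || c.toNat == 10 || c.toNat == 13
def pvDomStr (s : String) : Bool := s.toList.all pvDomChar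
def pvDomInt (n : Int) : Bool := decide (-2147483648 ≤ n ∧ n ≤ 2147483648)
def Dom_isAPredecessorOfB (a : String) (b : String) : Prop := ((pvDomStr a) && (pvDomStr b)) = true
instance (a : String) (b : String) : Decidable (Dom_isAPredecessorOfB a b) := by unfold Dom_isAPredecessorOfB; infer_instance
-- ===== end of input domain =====

-- B replaces A's two-pointer prefix/suffix index walk with a length guard plus trying every
-- single-character deletion of b (objective: simpler).

-- ===== PORT A =====
-- first while loop of A: advance index while a[index] == b[index]
def pvLoop1 (la lb : List Char) (i : Nat) : Nat :=
  if i < la.length ∧ i < lb.length ∧ la.getD i ' ' = lb.getD i ' ' then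
    pvLoop1 la lb (i + 1)
  else i
termination_by la.length - i
decreasing_by omega

-- second while loop of A: advance index while a[index] == b[index+1]
def pvLoop2 (la lb : List Char) (i : Nat) : Nat :=
  if i < la.length ∧ i + 1 < lb.length ∧ la.getD i ' ' = lb.getD (i + 1) ' ' then
    pvLoop2 la lb (i + 1)
  else i
termination_by la.length - i
decreasing_by omega

def isAPredecessorOfB (a : String) (b : String) : Bool :=
  if a = b then false
  else
    let la := a.toList
    let lb := b.toList
    let i1 := pvLoop1 la lb 0
    let i2 := pvLoop2 la lb i1
    if i2 = la.length ∧ i2 + 1 = lb.length then true else false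

-- ===== PORT B =====
def isAPredecessorOfB_alt (a : String) (b : String) : Bool :=
  if b.toList.length ≠ a.toList.length + 1 then false
  else (List.range b.toList.length).any
    (fun i => b.toList.take i ++ b.toList.drop (i + 1) == a.toList)

-- ===== PRECONDITION & SPEC =====
def Spec_isAPredecessorOfB (a : String) (b : String) (out : Bool) : Prop := out = isAPredecessorOfB_alt a b
instance (a : String) (b : String) (out : Bool) : Decidable (Spec_isAPredecessorOfB a b out) := by unfold Spec_isAPredecessorOfB; infer_instance

-- ===== CLAIM (what is proved, stated in full; the proofs are below) =====
def Claim_equal_isAPredecessorOfB : Prop := ∀ (a : String) (b : String), Dom_isAPredecessorOfB a b → Spec_isAPredecessorOfB a b (isAPredecessorOfB a b)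

-- ===== LEMMAS AND PROOFS =====

-- the first loop stops at the first mismatch (capped at the shorter length)
theorem pvLoop1_spec (la lb : List Char) (i : Nat)
    (hla : i ≤ la.length) (hlb : i ≤ lb.length)
    (hpre : la.take i = lb.take i) :
    pvLoop1 la lb i ≤ la.length ∧ pvLoop1 la lb i ≤ lb.length ∧
      la.take (pvLoop1 la lb i) = lb.take (pvLoop1 la lb i) ∧
      (pvLoop1 la lb i < la.length → pvLoop1 la lb i < lb.length →
        la.getD (pvLoop1 la lb i) ' ' ≠ lb.getD (pvLoop1 la lb i) ' ') := by
  by_cases h : i < la.length ∧ i < lb.length ∧ la.getD i ' ' = lb.getD i ' '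
  · rw [pvLoop1, if_pos h]
    obtain ⟨h1, h2, h3⟩ := h
    rw [List.getD_eq_getElem?_getD, List.getD_eq_getElem?_getD,
        List.getElem?_eq_getElem h1, List.getElem?_eq_getElem h2] at h3
    simp only [Option.getD_some] at h3
    have hpre' : la.take (i + 1) = lb.take (i + 1) := by
      rw [List.take_add_one, List.take_add_one, hpre,
          List.getElem?_eq_getElem h1, List.getElem?_eq_getElem h2, h3]
    exact pvLoop1_spec la lb (i + 1) (by omega) (by omega) hpre'
  · rw [pvLoop1, if_neg h]
    exact ⟨hla, hlb, hpre, fun h1 h2 h3 => h ⟨h1, h2, h3⟩⟩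
termination_by la.length - i
decreasing_by omega

-- the second loop reaches exactly the final successful state iff a's tail equals b's shifted tail
theorem pvLoop2_spec (la lb : List Char) (i : Nat)
    (hla : i ≤ la.length) (hlen : lb.length = la.length + 1) :
    (pvLoop2 la lb i = la.length ∧ pvLoop2 la lb i + 1 = lb.length) ↔
      la.drop i = lb.drop (i + 1) := by
  by_cases h : i < la.length ∧ i + 1 < lb.length ∧ la.getD i ' ' = lb.getD (i + 1) ' '
  · rw [pvLoop2, if_pos h]
    obtain ⟨h1, h2, h3⟩ := h
    rw [List.getD_eq_getElem?_getD, List.getD_eq_getElem?_getD,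
        List.getElem?_eq_getElem h1, List.getElem?_eq_getElem h2] at h3
    simp only [Option.getD_some] at h3
    rw [pvLoop2_spec la lb (i + 1) (by omega) hlen]
    rw [List.drop_eq_getElem_cons h1, List.drop_eq_getElem_cons h2]
    constructor
    · intro ht; rw [h3, ht]
    · intro ht; injection ht with he ht2
  · rw [pvLoop2, if_neg h]
    rcases Nat.lt_or_ge i la.length with hlt | hge
    · have h2 : i + 1 < lb.length := by omega
      have hne : la.getD i ' ' ≠ lb.getD (i + 1) ' ' := fun he => h ⟨hlt, h2, he⟩
      constructor
      · rintro ⟨ha, -⟩; omega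
      · intro hd
        exfalso
        rw [List.drop_eq_getElem_cons hlt, List.drop_eq_getElem_cons h2] at hd
        injection hd with he _
        apply hne
        rw [List.getD_eq_getElem?_getD, List.getD_eq_getElem?_getD,
            List.getElem?_eq_getElem hlt, List.getElem?_eq_getElem h2]
        simp [he]
    · have hi : i = la.length := by omega
      subst hi
      have r1 : la.drop la.length = [] := by simp
      have r2 : lb.drop (la.length + 1) = [] := List.drop_eq_nil_of_le (by omega)
      simp [r1, r2, hlen]

-- with the length fixed, "some single deletion of b gives a" is equivalent to
-- "the tails after the first mismatch line up" (the deletion can be moved to the mismatch)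
theorem pvExistsDel_iff (la lb : List Char) (hlen : lb.length = la.length + 1) :
    ((List.range lb.length).any (fun i => lb.take i ++ lb.drop (i + 1) == la) = true) ↔
      la.drop (pvLoop1 la lb 0) = lb.drop (pvLoop1 la lb 0 + 1) := by
  obtain ⟨hpa, hpb, hpre, hmis⟩ := pvLoop1_spec la lb 0 (by omega) (by omega) rfl
  set p := pvLoop1 la lb 0 with hp
  simp only [List.any_eq_true, List.mem_range, beq_iff_eq]
  constructor
  · rintro ⟨i, hi, hdel⟩
    rcases Nat.lt_or_ge p la.length with hplt | hpge
    · have hpb' : p < lb.length := by omega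
      have hne := hmis hplt hpb'
      have hip : i ≤ p := by
        by_contra hle
        have hgt : p < i := by omega
        apply hne
        have hq : la[p]? = lb[p]? := by
          calc la[p]? = (lb.take i ++ lb.drop (i + 1))[p]? := by rw [hdel]
            _ = (lb.take i)[p]? := by
                  rw [List.getElem?_append_left]
                  simp only [List.length_take]; omega
            _ = lb[p]? := List.getElem?_take_of_lt hgt
        rw [List.getD_eq_getElem?_getD, List.getD_eq_getElem?_getD, hq]
      have hdr : la.drop i = lb.drop (i + 1) := by
        have hlen_t : (lb.take i).length = i := by
          simp only [List.length_take]; omega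
        calc la.drop i = (lb.take i ++ lb.drop (i + 1)).drop i := by rw [hdel]
          _ = (lb.take i ++ lb.drop (i + 1)).drop (lb.take i).length := by rw [hlen_t]
          _ = lb.drop (i + 1) := List.drop_left
      have hstep := congrArg (List.drop (p - i)) hdr
      rw [List.drop_drop, List.drop_drop] at hstep
      have e1 : i + (p - i) = p := by omega
      have e2 : i + 1 + (p - i) = p + 1 := by omega
      rwa [e1, e2] at hstep
    · have hp' : p = la.length := by omega
      rw [hp']
      have r2 : lb.drop (la.length + 1) = [] := List.drop_eq_nil_of_le (by omega)
      simp [r2]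
  · intro hdr
    refine ⟨p, by omega, ?_⟩
    calc lb.take p ++ lb.drop (p + 1) = la.take p ++ la.drop p := by rw [← hpre, ← hdr]
      _ = la := List.take_append_drop p la

-- ===== VERDICT (by name: the statement is the Claim_ definition above) =====
theorem isAPredecessorOfB_spec : Claim_equal_isAPredecessorOfB := by
  intro a b _
  unfold Spec_isAPredecessorOfB
  simp only [isAPredecessorOfB, isAPredecessorOfB_alt]
  by_cases hab : a = b
  · subst hab
    rw [if_pos rfl, if_pos (by omega)]
  · rw [if_neg hab]
    by_cases hlen : b.toList.length = a.toList.length + 1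
    · rw [if_neg (by omega : ¬ b.toList.length ≠ a.toList.length + 1)]
      have h0 := (pvLoop1_spec a.toList b.toList 0 (by omega) (by omega) rfl).1
      have hiff := pvLoop2_spec a.toList b.toList (pvLoop1 a.toList b.toList 0) h0 hlen
      have hx := pvExistsDel_iff a.toList b.toList hlen
      split
      · next hcond => exact (hx.mpr (hiff.mp hcond)).symm
      · next hcond =>
          have hfalse : ¬ ((List.range b.toList.length).any
              (fun i => b.toList.take i ++ b.toList.drop (i + 1) == a.toList) = true) :=
            fun h => hcond (hiff.mpr (hx.mp h))
          exact (Bool.eq_false_iff.mpr hfalse).symm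
    · rw [if_pos (by omega : b.toList.length ≠ a.toList.length + 1)]
      split
      · next hcond => exfalso; obtain ⟨h1, h2⟩ := hcond; omega
      · rfl
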